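-- pv_equiv track=rewrite | github.com/ListeningRift/TuneFlow | src/utils/benchmarking.py | _collect_continuation_split_positions
-- ===== SOURCE A (Python) =====
-- def _collect_continuation_split_positions(core: list[str]) -> list[int]:
--     positions: set[int] = set()
--     idx = 0
--     if idx < len(core) and core[idx].startswith("TEMPO_"):
--         idx += 1
--         positions.add(idx)
--
--     while idx < len(core):
--         if core[idx] != "BAR":
--             return []
--         positions.add(idx)
--         idx += 1
--         if idx < len(core) and core[idx].startswith("TEMPO_"):
--             idx += 1
--
--         while idx < len(core) and core[idx].startswith("POS_"):
--             positions.add(idx)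
--             if idx + 4 >= len(core):
--                 return []
--             if not core[idx + 1].startswith("INST_"):
--                 return []
--             if not core[idx + 2].startswith("PITCH_"):
--                 return []
--             if not core[idx + 3].startswith("DUR_"):
--                 return []
--             if not core[idx + 4].startswith("VEL_"):
--                 return []
--             idx += 5
--
--     positions.discard(0)
--     positions.discard(len(core))
--     return sorted(positions)
-- ===== SOURCE B (Python) =====
-- def _collect_continuation_split_positions(core: list[str]) -> list[int]:
--     # Segment-based validation: precompute all BAR indices, then check each
--     # inter-bar segment arithmetically (optional TEMPO, then whole 5-token notes).
--     n = len(core)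
--     bars = [i for i in range(n) if core[i] == "BAR"]
--
--     def parse_notes(start, end):
--         # tokens [start:end) must be whole notes; return their POS indices, or None
--         if (end - start) % 5:
--             return None
--         out = []
--         for j in range(start, end, 5):
--             if not core[j].startswith("POS_") \
--                or not core[j + 1].startswith("INST_") \
--                or not core[j + 2].startswith("PITCH_") \
--                or not core[j + 3].startswith("DUR_") \
--                or not core[j + 4].startswith("VEL_"):
--                 return None
--             out.append(j)
--         return out
--
--     b0 = bars[0] if bars else n
--     if b0 == 0:
--         acc = []
--     elif b0 == 1 and core[0].startswith("TEMPO_"):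
--         acc = [1]
--     else:
--         return []
--
--     for k in range(len(bars)):
--         b = bars[k]
--         end = bars[k + 1] if k + 1 < len(bars) else n
--         start = b + 2 if b + 1 < end and core[b + 1].startswith("TEMPO_") else b + 1
--         notes = parse_notes(start, end)
--         if notes is None:
--             return []
--         acc += [b] + notes
--
--     pts = set(acc)
--     pts.discard(0)
--     pts.discard(n)
--     return sorted(pts)
-- ===== Notes on version B (the rewrite author's own statement) =====
-- stated objective: alternative
-- what changed: Replaced A's single stateful scan (nested while-loops mutating idx and a set, with early returns) by a segment-based validator: it first materializes the list of all BAR indices with one filter pass, checks the head segment by its length, then validates each inter-bar segment independently (optional TEMPO, a divisibility-by-5 length check, then whole 5-token notes via range(start,end,5)), collecting split positions per segment.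
import Mathlib
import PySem

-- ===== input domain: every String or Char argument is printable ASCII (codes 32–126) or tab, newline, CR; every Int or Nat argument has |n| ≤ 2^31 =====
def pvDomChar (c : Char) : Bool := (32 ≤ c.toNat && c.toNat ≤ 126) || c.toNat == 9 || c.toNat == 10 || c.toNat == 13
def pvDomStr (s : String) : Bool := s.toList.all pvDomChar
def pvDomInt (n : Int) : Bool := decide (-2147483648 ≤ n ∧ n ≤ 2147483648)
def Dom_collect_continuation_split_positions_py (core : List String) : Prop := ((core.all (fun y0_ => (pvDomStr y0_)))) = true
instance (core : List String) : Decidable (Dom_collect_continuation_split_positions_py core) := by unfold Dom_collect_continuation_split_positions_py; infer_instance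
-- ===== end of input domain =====

-- B replaces A's single stateful scan by a segment-based validator: it precomputes all BAR
-- indices with one filter pass, checks the head segment by its length, and validates each
-- inter-bar segment independently (optional TEMPO, length % 5 check, whole 5-token notes);
-- objective: alternative.


-- ===== PORT A =====
-- inner 'while idx < len(core) and core[idx].startswith("POS_")' loop of A; none = the
-- function's 'return []'. fuel only bounds the recursion: idx advances by 5 each pass, so any
-- fuel ≥ core.length + 1 (what the callers pass) is never exhausted.
def aInner (core : List String) (fuel : Nat) (idx : Nat) (positions : PySem.Set Int) :
    Option (Nat × PySem.Set Int) :=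
  match fuel with
  | 0 => none
  | fuel + 1 =>
    if idx < core.length ∧ PySem.Str.startswith (core.getD idx "") "POS_" then
      if core.length ≤ idx + 4 then none
      else if ¬ PySem.Str.startswith (core.getD (idx + 1) "") "INST_" then none
      else if ¬ PySem.Str.startswith (core.getD (idx + 2) "") "PITCH_" then none
      else if ¬ PySem.Str.startswith (core.getD (idx + 3) "") "DUR_" then none
      else if ¬ PySem.Str.startswith (core.getD (idx + 4) "") "VEL_" then none
      else aInner core fuel (idx + 5) (PySem.Set.add positions (idx : Int))
    else some (idx, positions)

-- outer 'while idx < len(core)' loop of A; idx grows by ≥ 1 per pass, so fuel core.length + 1 suffices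
def aOuter (core : List String) (fuel : Nat) (idx : Nat) (positions : PySem.Set Int) :
    Option (PySem.Set Int) :=
  match fuel with
  | 0 => none
  | fuel + 1 =>
    if idx < core.length then
      if core.getD idx "" ≠ "BAR" then none
      else
        match aInner core (core.length + 1)
            (if idx + 1 < core.length ∧ PySem.Str.startswith (core.getD (idx + 1) "") "TEMPO_"
             then idx + 2 else idx + 1)
            (PySem.Set.add positions (idx : Int)) with
        | none => none
        | some (idx', positions') => aOuter core fuel idx' positions'
    else some positions

def collect_continuation_split_positions_py (core : List String) : List Int :=
  match aOuter core (core.length + 1)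
      (if 0 < core.length ∧ PySem.Str.startswith (core.getD 0 "") "TEMPO_" then 1 else 0)
      (if 0 < core.length ∧ PySem.Str.startswith (core.getD 0 "") "TEMPO_"
       then PySem.Set.add PySem.Set.empty (1 : Int) else PySem.Set.empty) with
  | none => []
  | some positions =>
      PySem.List.sorted
        (PySem.Set.discard (PySem.Set.discard positions 0) (core.length : Int))
        (fun x => x) false

-- ===== PORT B =====
-- the comprehension's test 't == "BAR"'
def isBar (core : List String) (i : Nat) : Bool := core.getD i "" == "BAR"

-- the 'for j in range(start, end, 5)' loop of parse_notes (start ≤ e, alignment already checked)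
def bNotesGo (core : List String) (start e : Nat) : Option (List Int) :=
  if h : start < e then
    if PySem.Str.startswith (core.getD start "") "POS_"
        ∧ PySem.Str.startswith (core.getD (start + 1) "") "INST_"
        ∧ PySem.Str.startswith (core.getD (start + 2) "") "PITCH_"
        ∧ PySem.Str.startswith (core.getD (start + 3) "") "DUR_"
        ∧ PySem.Str.startswith (core.getD (start + 4) "") "VEL_" then
      (bNotesGo core (start + 5) e).map (fun ps => (start : Int) :: ps)
    else none
  else some []
termination_by e - start
decreasing_by omega

-- parse_notes(start, end): whole 5-token notes on [start, end), their POS indices, none on failure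
def bNotes (core : List String) (start e : Nat) : Option (List Int) :=
  if (e - start) % 5 ≠ 0 then none else bNotesGo core start e

-- the 'for k in range(len(bars))' loop: each bar's segment runs to the next bar (or the end)
def bBarLoop (core : List String) : List Nat → List Int → Option (List Int)
  | [], acc => some acc
  | b :: rest, acc =>
    let e := rest.headD core.length
    let start := if b + 1 < e ∧ PySem.Str.startswith (core.getD (b + 1) "") "TEMPO_"
                 then b + 2 else b + 1
    match bNotes core start e with
    | none => none
    | some ps => bBarLoop core rest (acc ++ (b : Int) :: ps)

def collect_continuation_split_positions_py_alt (core : List String) : List Int :=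
  let n := core.length
  let bars := (List.range n).filter (isBar core)
  let b0 := bars.headD n
  let acc0 : Option (List Int) :=
    if b0 = 0 then some []
    else if b0 = 1 ∧ PySem.Str.startswith (core.getD 0 "") "TEMPO_" then some [1]
    else none
  match acc0 with
  | none => []
  | some acc =>
    match bBarLoop core bars acc with
    | none => []
    | some acc =>
        PySem.List.sorted
          (PySem.Set.discard (PySem.Set.discard (PySem.Set.ofList acc) 0) (n : Int))
          (fun x => x) false

-- ===== PRECONDITION & SPEC =====
def Spec_collect_continuation_split_positions_py (core : List String) (out : List Int) : Prop := out = collect_continuation_split_positions_py_alt core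
instance (core : List String) (out : List Int) : Decidable (Spec_collect_continuation_split_positions_py core out) := by unfold Spec_collect_continuation_split_positions_py; infer_instance

-- ===== CLAIM (what is proved, stated in full; the proofs are below) =====
def Claim_equal_collect_continuation_split_positions_py : Prop := ∀ (core : List String), Dom_collect_continuation_split_positions_py core → Spec_collect_continuation_split_positions_py core (collect_continuation_split_positions_py core)

-- ===== LEMMAS AND PROOFS =====

-- smallest index ≥ s that is the end or a bar (proof-only helper)
def nb (core : List String) (s : Nat) : Nat :=
  if _h : s < core.length then (if isBar core s then s else nb core (s + 1))
  else core.length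
termination_by core.length - s
decreasing_by omega

-- remaining bar indices from s on (proof-only helper)
def R (core : List String) (s : Nat) : List Nat :=
  (List.range' s (core.length - s)).filter (isBar core)

theorem nb_ge (core : List String) (s : Nat) (h : s ≤ core.length) : s ≤ nb core s := by
  fun_induction nb core s with
  | case1 s h hb => omega
  | case2 s hlt hb ih => have := ih (by omega); omega
  | case3 s hge => omega

theorem nb_le (core : List String) (s : Nat) (h : s ≤ core.length) : nb core s ≤ core.length := by
  fun_induction nb core s with
  | case1 s h hb => omega
  | case2 s hlt hb ih => exact ih (by omega)
  | case3 s hge => omega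

theorem nb_no_bar (core : List String) (s : Nat) (h : s ≤ core.length) :
    ∀ j, s ≤ j → j < nb core s → isBar core j = false := by
  fun_induction nb core s with
  | case1 s h hb => intro j h1 h2; omega
  | case2 s hlt hb ih =>
    intro j h1 h2
    rcases Nat.eq_or_lt_of_le h1 with rfl | h1
    · simpa using hb
    · exact ih (by omega) j h1 h2
  | case3 s hge => intro j h1 h2; omega

theorem nb_spec (core : List String) (s : Nat) (h : s ≤ core.length) :
    nb core s = core.length ∨ isBar core (nb core s) = true := by
  fun_induction nb core s with
  | case1 s h hb => exact Or.inr hb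
  | case2 s hlt hb ih => exact ih (by omega)
  | case3 s hge => exact Or.inl rfl

theorem R_nil (core : List String) : R core core.length = [] := by
  simp [R]

theorem R_cons (core : List String) (s : Nat) (h : s < core.length) (hb : isBar core s = true) :
    R core s = s :: R core (s + 1) := by
  have : core.length - s = (core.length - (s+1)) + 1 := by omega
  rw [R, this, List.range'_succ, List.filter_cons, if_pos (by simpa using hb)]
  rfl

theorem R_skip (core : List String) (s : Nat) (h : s < core.length) (hb : isBar core s = false) :
    R core s = R core (s + 1) := by
  have : core.length - s = (core.length - (s+1)) + 1 := by omega
  rw [R, this, List.range'_succ, List.filter_cons, if_neg (by simp [hb])]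
  rfl

theorem R_eq_nb (core : List String) (s : Nat) (h : s ≤ core.length) :
    R core s = R core (nb core s) := by
  fun_induction nb core s with
  | case1 s h hb => rfl
  | case2 s hlt hb ih => rw [R_skip core s hlt (by simpa using hb)]; exact ih (by omega)
  | case3 s hge => have hs : s = core.length := by omega
                   rw [hs]

theorem headD_R (core : List String) (s : Nat) (h : s ≤ core.length) :
    (R core s).headD core.length = nb core s := by
  rw [R_eq_nb core s h]
  rcases nb_spec core s h with h1 | h1
  · rw [h1, R_nil]; rfl
  · have h2 : nb core s < core.length := by
      by_contra h2
      have := nb_le core s h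
      have : nb core s = core.length := by omega
      rw [this] at h1
      simp [isBar] at h1
    rw [R_cons core _ h2 h1]; rfl

theorem bars_eq_R0 (core : List String) :
    (List.range core.length).filter (isBar core) = R core 0 := by
  simp [R, List.range_eq_range']

-- A's inner note loop versus B's per-segment note check
theorem inner_eq (core : List String) (e : Nat)
    (he : e = core.length ∨ isBar core e = true) (hen : e ≤ core.length) :
    ∀ fuel start acc, start ≤ e → e - start < fuel →
    (∀ j, start ≤ j → j < e → isBar core j = false) →
    (∀ ps, bNotes core start e = some ps →
        aInner core fuel start (PySem.Set.ofList acc) = some (e, PySem.Set.ofList (acc ++ ps))) ∧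
    (bNotes core start e = none →
        aInner core fuel start (PySem.Set.ofList acc) = none ∨
        ∃ j st, aInner core fuel start (PySem.Set.ofList acc) = some (j, st) ∧
          j < core.length ∧ ¬ core.getD j "" = "BAR") := by
  intro fuel
  induction fuel with
  | zero => intro start acc h1 h2 h3; omega
  | succ fuel ih =>
    intro start acc hse hfuel hnb
    by_cases hstart : start = e
    · subst hstart
      have hNotes : bNotes core start start = some [] := by
        unfold bNotes
        rw [if_neg (by omega), bNotesGo]
        simp
      have hC : ¬ (start < core.length ∧
          PySem.Str.startswith (core.getD start "") "POS_" = true) := by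
        rcases he with he | he
        · omega
        · intro hc
          rw [show core.getD start "" = "BAR" by simpa [isBar] using he] at hc
          exact absurd hc.2 (by decide)
      constructor
      · intro ps hps
        rw [hNotes] at hps
        injection hps with hps
        subst hps
        simp only [aInner]
        rw [if_neg hC]
        simp
      · intro hps
        rw [hNotes] at hps
        cases hps
    · have hslt : start < e := by omega
      have hNone : ¬ (PySem.Str.startswith (core.getD start "") "POS_" = true ∧
            PySem.Str.startswith (core.getD (start + 1) "") "INST_" = true ∧
            PySem.Str.startswith (core.getD (start + 2) "") "PITCH_" = true ∧
            PySem.Str.startswith (core.getD (start + 3) "") "DUR_" = true ∧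
            PySem.Str.startswith (core.getD (start + 4) "") "VEL_" = true) →
          bNotes core start e = none := by
        intro hbad
        unfold bNotes
        by_cases hm : (e - start) % 5 ≠ 0
        · rw [if_pos hm]
        · rw [if_neg hm, bNotesGo, dif_pos hslt, if_neg hbad]
      by_cases hPOS : PySem.Str.startswith (core.getD start "") "POS_" = true
      · by_cases h4 : core.length ≤ start + 4
        · -- 'if idx + 4 >= len(core): return []' fires; the segment is shorter than a note
          have hA : aInner core (fuel + 1) start (PySem.Set.ofList acc) = none := by
            simp only [aInner]
            rw [if_pos ⟨by omega, hPOS⟩, if_pos h4]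
          constructor
          · intro ps hps
            rw [show bNotes core start e = none by
              unfold bNotes; rw [if_pos (by omega)]] at hps
            cases hps
          · intro _; exact Or.inl hA
        · by_cases c1 : PySem.Str.startswith (core.getD (start + 1) "") "INST_" = true
          · by_cases c2 : PySem.Str.startswith (core.getD (start + 2) "") "PITCH_" = true
            · by_cases c3 : PySem.Str.startswith (core.getD (start + 3) "") "DUR_" = true
              · by_cases c4 : PySem.Str.startswith (core.getD (start + 4) "") "VEL_" = true
                · -- a whole valid note at start; both sides advance by 5
                  have hstep : start + 5 ≤ e := by
                    by_contra hlt5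
                    rcases he with he | he
                    · omega
                    · have hbar : core.getD e "" = "BAR" := by simpa [isBar] using he
                      have : e = start + 1 ∨ e = start + 2 ∨ e = start + 3 ∨ e = start + 4 := by
                        omega
                      rcases this with h | h | h | h <;> rw [h] at hbar
                      · rw [hbar] at c1; exact absurd c1 (by decide)
                      · rw [hbar] at c2; exact absurd c2 (by decide)
                      · rw [hbar] at c3; exact absurd c3 (by decide)
                      · rw [hbar] at c4; exact absurd c4 (by decide)
                  have ihs := ih (start + 5) (acc ++ [(start : Int)]) (by omega) (by omega)
                    (fun j hj1 hj2 => hnb j (by omega) hj2)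
                  have hA : aInner core (fuel + 1) start (PySem.Set.ofList acc) =
                      aInner core fuel (start + 5)
                        (PySem.Set.ofList (acc ++ [(start : Int)])) := by
                    simp only [aInner]
                    rw [if_pos ⟨by omega, hPOS⟩, if_neg h4, if_neg (not_not_intro c1),
                      if_neg (not_not_intro c2), if_neg (not_not_intro c3),
                      if_neg (not_not_intro c4), ← PySem.Set.ofList_append_singleton]
                  have hBN : bNotes core start e =
                      (bNotes core (start + 5) e).map (fun ps => (start : Int) :: ps) := by
                    unfold bNotes
                    by_cases hm : (e - (start + 5)) % 5 = 0
                    · rw [if_neg (by omega), if_neg (by omega), bNotesGo, dif_pos hslt,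
                        if_pos ⟨hPOS, c1, c2, c3, c4⟩]
                    · rw [if_pos (by omega), if_pos (by omega)]
                      rfl
                  constructor
                  · intro ps hps
                    rw [hBN] at hps
                    cases hps2 : bNotes core (start + 5) e with
                    | none => rw [hps2] at hps; cases hps
                    | some ps' =>
                      rw [hps2] at hps
                      injection hps with hps
                      subst hps
                      rw [hA, ihs.1 ps' hps2]
                      simp
                  · intro hps
                    rw [hBN] at hps
                    have hps2 : bNotes core (start + 5) e = none := by
                      cases h : bNotes core (start + 5) e with
                      | none => rfl
                      | some _ => rw [h] at hps; cases hps
                    rw [hA]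
                    exact ihs.2 hps2
                · have hA : aInner core (fuel + 1) start (PySem.Set.ofList acc) = none := by
                    simp only [aInner]
                    rw [if_pos ⟨by omega, hPOS⟩, if_neg h4, if_neg (not_not_intro c1),
                      if_neg (not_not_intro c2), if_neg (not_not_intro c3),
                      if_pos (by simpa using c4)]
                  refine ⟨?_, fun _ => Or.inl hA⟩
                  intro ps hps
                  rw [hNone (by tauto)] at hps
                  cases hps
              · have hA : aInner core (fuel + 1) start (PySem.Set.ofList acc) = none := by
                  simp only [aInner]
                  rw [if_pos ⟨by omega, hPOS⟩, if_neg h4, if_neg (not_not_intro c1),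
                    if_neg (not_not_intro c2), if_pos (by simpa using c3)]
                refine ⟨?_, fun _ => Or.inl hA⟩
                intro ps hps
                rw [hNone (by tauto)] at hps
                cases hps
            · have hA : aInner core (fuel + 1) start (PySem.Set.ofList acc) = none := by
                simp only [aInner]
                rw [if_pos ⟨by omega, hPOS⟩, if_neg h4, if_neg (not_not_intro c1),
                  if_pos (by simpa using c2)]
              refine ⟨?_, fun _ => Or.inl hA⟩
              intro ps hps
              rw [hNone (by tauto)] at hps
              cases hps
          · have hA : aInner core (fuel + 1) start (PySem.Set.ofList acc) = none := by
              simp only [aInner]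
              rw [if_pos ⟨by omega, hPOS⟩, if_neg h4, if_pos (by simpa using c1)]
            refine ⟨?_, fun _ => Or.inl hA⟩
            intro ps hps
            rw [hNone (by tauto)] at hps
            cases hps
      · -- the token at start is not POS_: A's inner loop stops here, B's note check fails
        have hA : aInner core (fuel + 1) start (PySem.Set.ofList acc) =
            some (start, PySem.Set.ofList acc) := by
          simp only [aInner]
          rw [if_neg (fun hc => hPOS hc.2)]
        constructor
        · intro ps hps
          rw [hNone (by tauto)] at hps
          cases hps
        · intro _
          refine Or.inr ⟨start, PySem.Set.ofList acc, hA, by omega, ?_⟩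
          have := hnb start (le_refl _) hslt
          simpa [isBar] using this

-- A's outer bar loop versus B's iteration over the precomputed bar list
theorem outer_eq (core : List String) :
    ∀ fuel idx acc, idx ≤ core.length → (idx = core.length ∨ isBar core idx = true) →
    core.length - idx < fuel →
    aOuter core fuel idx (PySem.Set.ofList acc) =
      (bBarLoop core (R core idx) acc).map PySem.Set.ofList := by
  intro fuel
  induction fuel with
  | zero => intro idx acc h1 h2 h3; omega
  | succ fuel ih =>
    intro idx acc hle hbar hfuel
    rcases hbar with hEnd | hBar
    · subst hEnd
      simp only [aOuter]
      rw [if_neg (by omega), R_nil]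
      rfl
    · have hlt : idx < core.length := by
        by_contra h
        have hx : idx = core.length := by omega
        rw [hx] at hBar
        simp [isBar] at hBar
      have hgd : core.getD idx "" = "BAR" := by simpa [isBar] using hBar
      have h1n : idx + 1 ≤ core.length := by omega
      have hege : idx + 1 ≤ nb core (idx + 1) := nb_ge core (idx + 1) h1n
      have hele : nb core (idx + 1) ≤ core.length := nb_le core (idx + 1) h1n
      have hspec := nb_spec core (idx + 1) h1n
      have hnob := nb_no_bar core (idx + 1) h1n
      have hstart_eq : (if idx + 1 < core.length ∧
            PySem.Str.startswith (core.getD (idx + 1) "") "TEMPO_" = true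
          then idx + 2 else idx + 1) =
          (if idx + 1 < nb core (idx + 1) ∧
            PySem.Str.startswith (core.getD (idx + 1) "") "TEMPO_" = true
          then idx + 2 else idx + 1) := by
        by_cases ht : PySem.Str.startswith (core.getD (idx + 1) "") "TEMPO_" = true
        · by_cases hlt2 : idx + 1 < nb core (idx + 1)
          · rw [if_pos ⟨by omega, ht⟩, if_pos ⟨hlt2, ht⟩]
          · have hnb1 : nb core (idx + 1) = idx + 1 := by omega
            have hni : ¬ (idx + 1 < core.length ∧
                PySem.Str.startswith (core.getD (idx + 1) "") "TEMPO_" = true) := by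
              rw [hnb1] at hspec
              rcases hspec with h | h
              · intro hc; omega
              · intro hc
                rw [show core.getD (idx + 1) "" = "BAR" by simpa [isBar] using h] at hc
                exact absurd hc.2 (by decide)
            rw [if_neg hni, if_neg (fun hc => hlt2 hc.1)]
        · rw [if_neg (fun hc => ht hc.2), if_neg (fun hc => ht hc.2)]
      have hstartle : (if idx + 1 < nb core (idx + 1) ∧
            PySem.Str.startswith (core.getD (idx + 1) "") "TEMPO_" = true
          then idx + 2 else idx + 1) ≤ nb core (idx + 1) := by
        split_ifs with h
        · omega
        · exact hege
      have hstartge : idx + 1 ≤ (if idx + 1 < nb core (idx + 1) ∧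
            PySem.Str.startswith (core.getD (idx + 1) "") "TEMPO_" = true
          then idx + 2 else idx + 1) := by
        split_ifs <;> omega
      have hIn := inner_eq core (nb core (idx + 1)) hspec hele (core.length + 1)
        (if idx + 1 < nb core (idx + 1) ∧
            PySem.Str.startswith (core.getD (idx + 1) "") "TEMPO_" = true
          then idx + 2 else idx + 1)
        (acc ++ [(idx : Int)]) hstartle (by omega)
        (fun j hj1 hj2 => hnob j (by omega) hj2)
      simp only [aOuter]
      rw [if_pos hlt, if_neg (not_not_intro hgd), hstart_eq,
        ← PySem.Set.ofList_append_singleton]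
      rw [R_cons core idx hlt hBar]
      simp only [bBarLoop]
      rw [headD_R core (idx + 1) h1n]
      cases hbn : bNotes core
          (if idx + 1 < nb core (idx + 1) ∧
              PySem.Str.startswith (core.getD (idx + 1) "") "TEMPO_" = true
            then idx + 2 else idx + 1) (nb core (idx + 1)) with
      | none =>
        rcases hIn.2 hbn with hnone | ⟨j, st, hj, hjlt, hjbar⟩
        · rw [hnone]
          rfl
        · rw [hj]
          cases fuel with
          | zero => omega
          | succ fuel =>
            show aOuter core (fuel + 1) j st = none
            simp only [aOuter]
            rw [if_pos hjlt, if_pos hjbar]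
      | some ps =>
        rw [hIn.1 ps hbn]
        rw [show (acc ++ [(idx : Int)]) ++ ps = acc ++ (idx : Int) :: ps by simp]
        rw [show R core (idx + 1) = R core (nb core (idx + 1)) from R_eq_nb core (idx + 1) h1n]
        exact ih (nb core (idx + 1)) (acc ++ (idx : Int) :: ps) hele hspec (by omega)

-- ===== VERDICT (by name: the statement is the Claim_ definition above) =====
theorem collect_continuation_split_positions_py_spec : Claim_equal_collect_continuation_split_positions_py := by
  intro core _
  unfold Spec_collect_continuation_split_positions_py
  by_cases hn : core.length = 0
  · have hcore : core = [] := List.length_eq_zero_iff.mp hn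
    subst hcore
    decide
  · have hn0 : 0 < core.length := Nat.pos_of_ne_zero hn
    simp only [collect_continuation_split_positions_py,
      collect_continuation_split_positions_py_alt, bars_eq_R0,
      headD_R core 0 (Nat.zero_le _)]
    by_cases hbar0 : isBar core 0 = true
    · -- the stream begins with BAR
      have hgd0 : core.getD 0 "" = "BAR" := by simpa [isBar] using hbar0
      have hT : ¬ (0 < core.length ∧
          PySem.Str.startswith (core.getD 0 "") "TEMPO_" = true) := by
        intro hc
        rw [hgd0] at hc
        exact absurd hc.2 (by decide)
      have hnb0 : nb core 0 = 0 := by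
        rw [nb, dif_pos hn0, if_pos hbar0]
      rw [if_neg hT, if_neg hT, hnb0, if_pos rfl,
        show PySem.Set.empty = PySem.Set.ofList ([] : List Int) from rfl,
        outer_eq core (core.length + 1) 0 [] (Nat.zero_le _) (Or.inr hbar0) (by omega)]
      cases h2 : bBarLoop core (R core 0) [] <;> simp [h2]
    · have hbf0 : isBar core 0 = false := by simpa using hbar0
      have hnb01 : nb core 0 = nb core 1 := by
        rw [nb, dif_pos hn0, if_neg (by simp [hbf0])]
      have h1n : 1 ≤ core.length := hn0
      by_cases hT : PySem.Str.startswith (core.getD 0 "") "TEMPO_" = true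
      · -- a leading TEMPO token
        rw [if_pos ⟨hn0, hT⟩, if_pos ⟨hn0, hT⟩]
        by_cases hB1 : 1 = core.length ∨ isBar core 1 = true
        · have hnb1 : nb core 1 = 1 := by
            rcases hB1 with h | h
            · rw [nb, dif_neg (by omega)]
              omega
            · have h1lt : 1 < core.length := by
                by_contra hc
                have h1 : core.getD 1 "" = "BAR" := eq_of_beq (by unfold isBar at h; exact h)
                rw [List.getD_eq_getElem?_getD, List.getElem?_eq_none (by omega)] at h1
                simp at h1
              rw [nb, dif_pos h1lt, if_pos h]
          rw [hnb01, hnb1, if_neg (by omega), if_pos ⟨rfl, hT⟩,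
            show PySem.Set.add PySem.Set.empty (1 : Int) =
              PySem.Set.ofList [(1 : Int)] from rfl,
            outer_eq core (core.length + 1) 1 [(1 : Int)] h1n hB1 (by omega),
            show R core 1 = R core 0 from (R_skip core 0 hn0 hbf0).symm]
          cases h2 : bBarLoop core (R core 0) [(1 : Int)] <;> simp [h2]
        · push Not at hB1
          have h1lt : 1 < core.length := by
            rcases Nat.lt_or_ge 1 core.length with h | h
            · exact h
            · exact absurd (by omega) hB1.1
          have hgd1 : ¬ core.getD 1 "" = "BAR" := by
            have := hB1.2
            simpa [isBar] using this
          have hnb1ge : 2 ≤ nb core 1 := by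
            have hge := nb_ge core 1 h1n
            rcases Nat.eq_or_lt_of_le hge with h | h
            · exfalso
              rcases nb_spec core 1 h1n with hs | hs
              · rw [← h] at hs; exact hB1.1 hs
              · rw [← h] at hs; exact absurd hs (by simp [hB1.2])
            · omega
          rw [hnb01, if_neg (by omega), if_neg (by intro hc; omega)]
          show (match aOuter core (core.length + 1) 1
              (PySem.Set.add PySem.Set.empty 1) with
            | none => ([] : List Int)
            | some positions =>
                PySem.List.sorted
                  (PySem.Set.discard (PySem.Set.discard positions 0) (core.length : Int))
                  (fun x => x) false) = []
          have : aOuter core (core.length + 1) 1 (PySem.Set.add PySem.Set.empty 1) = none := by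
            have hlen : core.length + 1 = (core.length - 1) + 1 + 1 := by omega
            rw [hlen]
            simp only [aOuter]
            rw [if_pos h1lt, if_pos hgd1]
          rw [this]
      · -- no leading TEMPO, no leading BAR: both reject immediately
        rw [if_neg (fun hc => hT hc.2), if_neg (fun hc => hT hc.2)]
        have hnb1ge : 1 ≤ nb core 1 := nb_ge core 1 h1n
        rw [hnb01, if_neg (by omega), if_neg (fun hc => hT hc.2)]
        show (match aOuter core (core.length + 1) 0 PySem.Set.empty with
          | none => ([] : List Int)
          | some positions =>
              PySem.List.sorted
                (PySem.Set.discard (PySem.Set.discard positions 0) (core.length : Int))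
                (fun x => x) false) = []
        have hgd0 : ¬ core.getD 0 "" = "BAR" := by simpa [isBar] using hbar0
        have : aOuter core (core.length + 1) 0 PySem.Set.empty = none := by
          have hlen : core.length + 1 = (core.length - 1) + 1 + 1 := by omega
          rw [hlen]
          simp only [aOuter]
          rw [if_pos hn0, if_pos hgd0]
        rw [this]
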